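-- pv_equiv track=rewrite | github.com/andrewghaddad/OOP | OOP/Final_Review/q5.py | find_index_of_min
-- ===== SOURCE A (Python) =====
-- def find_index_of_min(l, used_indices):
--     #if all the indexes already visited or there are no element in the list then returns -1
--     if(len(l) == 0 or len(l) == len(used_indices)):
--         return -1
--     #defining a variable that stores the index that has not been visited yet.
--     minimumIndex = -1
--     #a minimum index is found or not is defined by this variable
--     found = 0
--     #this loop runs till it finds an index that is not in used_indices
--     while(found == 0):
--         minimumIndex += 1
--         if minimumIndex not in used_indices:
--             found = 1
--     #this loop finds minimum value index that has not been visited yet,i.e, not in used_indices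
--     for it in range(0, len(l)):
--         if it not in used_indices:
--             if(l[minimumIndex] > l[it]):
--                 minimumIndex = it
--     #we return the value of minimumIndex
--     return minimumIndex
-- ===== SOURCE B (Python) =====
-- def find_index_of_min(l, used_indices):
--     if len(l) == 0 or len(l) == len(used_indices):
--         return -1
--     for i in sorted(range(len(l)), key=lambda i: l[i]):
--         if i not in used_indices:
--             return i
--     return -1
-- ===== Notes on version B (the rewrite author's own statement) =====
-- stated objective: alternative
-- what changed: Replaces A's two-phase scan (a while-loop hunting the first unused index, then a from-scratch min scan) by precomputing a stable value-sorted ordering of the indices and returning the first one not yet used.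
-- intended difference: When every in-range index 0..len(l)-1 occurs in used_indices but len(used_indices) != len(l) (duplicates or out-of-range entries), A returns the first natural number absent from used_indices, an out-of-range index >= len(l); B returns -1, the value A itself uses for 'no unused index left', which is the intended result. — e.g. on find_index_of_min([5], [0, 7]): A returns 1, B returns -1
import Mathlib
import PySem

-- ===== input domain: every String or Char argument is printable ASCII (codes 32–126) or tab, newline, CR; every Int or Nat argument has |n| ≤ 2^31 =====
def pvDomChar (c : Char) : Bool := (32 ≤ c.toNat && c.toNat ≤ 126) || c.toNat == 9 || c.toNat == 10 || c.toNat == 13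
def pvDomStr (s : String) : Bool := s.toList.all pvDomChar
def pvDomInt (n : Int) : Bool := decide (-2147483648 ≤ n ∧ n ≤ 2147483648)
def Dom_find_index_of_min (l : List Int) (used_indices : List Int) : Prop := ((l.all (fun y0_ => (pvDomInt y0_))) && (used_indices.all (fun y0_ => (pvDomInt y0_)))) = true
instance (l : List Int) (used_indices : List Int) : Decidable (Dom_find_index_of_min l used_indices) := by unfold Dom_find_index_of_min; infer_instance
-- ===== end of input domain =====

-- B replaces A's two-phase scan (a while-loop for a first unused index, then a min scan) by one
-- pass over a stable value-sorted ordering of the indices; objective: alternative (similar cost).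

-- ===== PORT A =====
-- A's while-loop: m += 1 until m not in used_indices.  The fuel (used_indices.length + 1) only
-- makes the recursion structural; it is always sufficient (pv_exists_unused below), so the
-- fuel-exhausted branch is unreachable and the loop is ported exactly.
def pyA_firstUnused (used : List Int) : Nat → Int → Int
  | 0, m => m + 1
  | fuel + 1, m => if (m + 1) ∈ used then pyA_firstUnused used fuel (m + 1) else (m + 1)

-- l[minimumIndex] is only evaluated where Python reads it without raising (when the branch is
-- reachable the index is in range), so pyGetD's default 0 is never used.
def find_index_of_min (l : List Int) (used_indices : List Int) : Int :=
  if l.length = 0 ∨ l.length = used_indices.length then -1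
  else
    (PySem.List.pyRange 0 (l.length) 1).foldl
      (fun m it =>
        if it ∉ used_indices then
          if PySem.List.pyGetD l m 0 > PySem.List.pyGetD l it 0 then it else m
        else m)
      (pyA_firstUnused used_indices (used_indices.length + 1) (-1))

-- ===== PORT B =====
-- B's for-loop with an early return over the sorted index order is List.find?
def find_index_of_min_alt (l : List Int) (used_indices : List Int) : Int :=
  if l.length = 0 ∨ l.length = used_indices.length then -1
  else
    match (PySem.List.sorted (PySem.List.pyRange 0 (l.length) 1)
            (fun i => PySem.List.pyGetD l i 0)).find? (fun i => decide (i ∉ used_indices)) with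
    | some i => i
    | none => -1

-- ===== PRECONDITION & SPEC =====
-- When every in-range index 0..len(l)-1 occurs in used_indices but the lengths differ (duplicate
-- or out-of-range entries in used_indices), A returns the first natural number absent from
-- used_indices — an out-of-range index ≥ len(l) — while B returns -1, A's own convention for
-- "no unused index", which is the intended value.
def D_find_index_of_min (l : List Int) (used_indices : List Int) : Prop :=
  l ≠ [] ∧ l.length ≠ used_indices.length ∧
    ∀ i ∈ PySem.List.pyRange 0 (l.length) 1, i ∈ used_indices
instance (l : List Int) (used_indices : List Int) : Decidable (D_find_index_of_min l used_indices) := by unfold D_find_index_of_min; infer_instance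

def Spec_find_index_of_min (l : List Int) (used_indices : List Int) (out : Int) : Prop :=
  ¬ D_find_index_of_min l used_indices → out = find_index_of_min_alt l used_indices
instance (l : List Int) (used_indices : List Int) (out : Int) : Decidable (Spec_find_index_of_min l used_indices out) := by unfold Spec_find_index_of_min; infer_instance

def pvDiffWitness_find_index_of_min : List Int × List Int := ([5], [0, 7])
def pvDiffWitnessOut_find_index_of_min : Int × Int := (1, -1)

-- ===== CLAIM (what is proved, stated in full; the proofs are below) =====
def Claim_unchanged_find_index_of_min : Prop := ∀ (l : List Int) (used_indices : List Int), Dom_find_index_of_min l used_indices → Spec_find_index_of_min l used_indices (find_index_of_min l used_indices)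
def Claim_changed_find_index_of_min : Prop := Dom_find_index_of_min (pvDiffWitness_find_index_of_min.1) (pvDiffWitness_find_index_of_min.2) ∧ D_find_index_of_min (pvDiffWitness_find_index_of_min.1) (pvDiffWitness_find_index_of_min.2) ∧ find_index_of_min (pvDiffWitness_find_index_of_min.1) (pvDiffWitness_find_index_of_min.2) = pvDiffWitnessOut_find_index_of_min.1 ∧ find_index_of_min_alt (pvDiffWitness_find_index_of_min.1) (pvDiffWitness_find_index_of_min.2) = pvDiffWitnessOut_find_index_of_min.2 ∧ pvDiffWitnessOut_find_index_of_min.1 ≠ pvDiffWitnessOut_find_index_of_min.2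
def Claim_exact_find_index_of_min : Prop := ∀ (l : List Int) (used_indices : List Int), Dom_find_index_of_min l used_indices → D_find_index_of_min l used_indices → find_index_of_min l used_indices ≠ find_index_of_min_alt l used_indices

-- ===== LEMMAS AND PROOFS =====

-- the while-loop returns the least integer above m not in used, provided one exists within fuel
theorem pv_firstUnused_spec (used : List Int) :
    ∀ (fuel : Nat) (m : Int), (∃ k : Int, m < k ∧ k ≤ m + fuel ∧ k ∉ used) →
      pyA_firstUnused used fuel m ∉ used ∧ m < pyA_firstUnused used fuel m ∧
        ∀ j : Int, m < j → j < pyA_firstUnused used fuel m → j ∈ used := by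
  intro fuel
  induction fuel with
  | zero =>
    intro m ⟨k, h1, h2, _⟩
    exact absurd h2 (by push_cast; omega)
  | succ fuel ih =>
    intro m ⟨k, h1, h2, h3⟩
    by_cases hm : (m + 1) ∈ used
    · have hk1 : m + 1 < k := by
        rcases eq_or_lt_of_le (by omega : m + 1 ≤ k) with he | hl
        · exact absurd hm (he ▸ h3)
        · exact hl
      have hrec := ih (m + 1) ⟨k, hk1, by push_cast at h2 ⊢; omega, h3⟩
      simp only [pyA_firstUnused, if_pos hm]
      refine ⟨hrec.1, by omega, fun j hj1 hj2 => ?_⟩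
      rcases eq_or_lt_of_le (by omega : m + 1 ≤ j) with he | hl
      · exact he ▸ hm
      · exact hrec.2.2 j hl hj2
    · simp only [pyA_firstUnused, if_neg hm]
      exact ⟨hm, by omega, fun j hj1 hj2 => absurd hj1 (by omega)⟩

-- fuel sufficiency: among 0 .. used.length there is an integer not in used (pigeonhole)
theorem pv_exists_unused (used : List Int) :
    ∃ k : Int, (-1 : Int) < k ∧ k ≤ -1 + ((used.length : Int) + 1) ∧ k ∉ used := by
  by_contra h
  push_neg at h
  have hsub : PySem.List.pyRange 0 ((used.length : Int) + 1) 1 ⊆ used := by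
    intro x hx
    rw [PySem.List.mem_pyRange_one] at hx
    exact h x (by omega) (by omega)
  have hnd : (PySem.List.pyRange 0 ((used.length : Int) + 1) 1).Nodup :=
    PySem.List.nodup_pyRange_one _ _
  have hlen := (List.subperm_of_subset hnd hsub).length_le
  rw [PySem.List.length_pyRange_one] at hlen
  omega

-- the min-scan loop leaves its state unchanged when every scanned index is used
theorem pv_fold_noop (l used : List Int) :
    ∀ (L : List Int) (m : Int), (∀ i ∈ L, i ∈ used) →
      L.foldl (fun m it =>
        if it ∉ used then
          if PySem.List.pyGetD l m 0 > PySem.List.pyGetD l it 0 then it else m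
        else m) m = m := by
  intro L
  induction L with
  | nil => intro m _; rfl
  | cons it L ih =>
    intro m hall
    have hit : it ∈ used := hall it List.mem_cons_self
    simp only [List.foldl_cons, if_neg (not_not_intro hit)]
    exact ih m (fun i hi => hall i (List.mem_cons_of_mem _ hi))

-- characterisation of A's min-scan: starting from an unused index m that is ≤ every unused
-- member of the strictly increasing list L, the fold computes the (value, index)-lexicographic
-- minimum over {m} ∪ (unused members of L)
theorem pv_fold_min (used : List Int) (key : Int → Int) :
    ∀ (L : List Int) (m : Int), m ∉ used → (∀ i ∈ L, i ∉ used → m ≤ i) →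
      L.Pairwise (· < ·) →
      (L.foldl (fun m it =>
          if it ∉ used then (if key m > key it then it else m) else m) m) ∉ used ∧
      ((L.foldl (fun m it =>
          if it ∉ used then (if key m > key it then it else m) else m) m) = m ∨
       (L.foldl (fun m it =>
          if it ∉ used then (if key m > key it then it else m) else m) m) ∈ L) ∧
      (key (L.foldl (fun m it =>
          if it ∉ used then (if key m > key it then it else m) else m) m) < key m ∨
       (key (L.foldl (fun m it =>
          if it ∉ used then (if key m > key it then it else m) else m) m) = key m ∧
        (L.foldl (fun m it =>
          if it ∉ used then (if key m > key it then it else m) else m) m) ≤ m)) ∧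
      ∀ i ∈ L, i ∉ used →
        (key (L.foldl (fun m it =>
            if it ∉ used then (if key m > key it then it else m) else m) m) < key i ∨
         (key (L.foldl (fun m it =>
            if it ∉ used then (if key m > key it then it else m) else m) m) = key i ∧
          (L.foldl (fun m it =>
            if it ∉ used then (if key m > key it then it else m) else m) m) ≤ i)) := by
  intro L
  induction L with
  | nil =>
    intro m hm _ _
    exact ⟨hm, Or.inl rfl, Or.inr ⟨rfl, le_refl m⟩, by simp⟩
  | cons it L ih =>
    intro m hm hle hpw
    have hpwt : L.Pairwise (· < ·) := hpw.of_cons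
    have hit : ∀ i ∈ L, it < i := (List.pairwise_cons.mp hpw).1
    by_cases hu : it ∈ used
    · simp only [List.foldl_cons, if_neg (not_not_intro hu)]
      have h := ih m hm (fun i hi => hle i (List.mem_cons_of_mem _ hi)) hpwt
      refine ⟨h.1, ?_, h.2.2.1, ?_⟩
      · rcases h.2.1 with h' | h'
        · exact Or.inl h'
        · exact Or.inr (List.mem_cons_of_mem _ h')
      · intro i hi hiu
        rcases List.mem_cons.mp hi with rfl | hi'
        · exact absurd hu hiu
        · exact h.2.2.2 i hi' hiu
    · have hmit : m ≤ it := hle it List.mem_cons_self hu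
      simp only [List.foldl_cons, if_pos hu]
      by_cases hk : key m > key it
      · simp only [if_pos hk]
        have h := ih it hu (fun i hi _ => le_of_lt (hit i hi)) hpwt
        refine ⟨h.1, ?_, ?_, ?_⟩
        · rcases h.2.1 with h' | h'
          · rw [h']; exact Or.inr List.mem_cons_self
          · exact Or.inr (List.mem_cons_of_mem _ h')
        · rcases h.2.2.1 with h' | ⟨h1, _⟩
          · exact Or.inl (lt_trans h' hk)
          · exact Or.inl (h1 ▸ hk)
        · intro i hi hiu
          rcases List.mem_cons.mp hi with rfl | hi'
          · exact h.2.2.1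
          · exact h.2.2.2 i hi' hiu
      · simp only [if_neg hk]
        push_neg at hk
        have h := ih m hm (fun i hi => hle i (List.mem_cons_of_mem _ hi)) hpwt
        refine ⟨h.1, ?_, h.2.2.1, ?_⟩
        · rcases h.2.1 with h' | h'
          · exact Or.inl h'
          · exact Or.inr (List.mem_cons_of_mem _ h')
        · intro i hi hiu
          rcases List.mem_cons.mp hi with rfl | hi'
          · rcases h.2.2.1 with h' | ⟨h1, h2⟩
            · exact Or.inl (lt_of_lt_of_le h' hk)
            · rcases lt_or_eq_of_le hk with h'' | h''
              · exact Or.inl (h1 ▸ h'')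
              · exact Or.inr ⟨h1.trans h'', le_trans h2 hmit⟩
          · exact h.2.2.2 i hi' hiu

-- stability of PySem's insertion sort on a strictly increasing input: the sorted result is
-- pairwise (value, index)-lexicographically increasing
theorem pv_insertBy_stable (key : Int → Int) (x : Int) :
    ∀ (ys : List Int),
      ys.Pairwise (fun a b => key a < key b ∨ (key a = key b ∧ a < b)) →
      (∀ a ∈ ys, a < x) →
      (PySem.List.insertBy (fun a b => decide (key a < key b)) x ys).Pairwise
        (fun a b => key a < key b ∨ (key a = key b ∧ a < b)) := by
  intro ys
  induction ys with
  | nil => intro _ _; simp [PySem.List.insertBy]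
  | cons y ys ih =>
    intro hpw hall
    have hy : ∀ z ∈ ys, key y < key z ∨ (key y = key z ∧ y < z) :=
      (List.pairwise_cons.mp hpw).1
    have hpwt := hpw.of_cons
    by_cases h : key x < key y
    · have hb : decide (key x < key y) = true := by simpa using h
      simp only [PySem.List.insertBy, if_pos hb]
      refine List.pairwise_cons.mpr ⟨?_, hpw⟩
      intro z hz
      rcases List.mem_cons.mp hz with rfl | hz'
      · exact Or.inl h
      · rcases hy z hz' with h' | ⟨h', _⟩
        · exact Or.inl (lt_trans h h')
        · exact Or.inl (h' ▸ h)
    · have hb : ¬(decide (key x < key y) = true) := by simpa using h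
      simp only [PySem.List.insertBy, if_neg hb]
      push_neg at h
      refine List.pairwise_cons.mpr
        ⟨?_, ih hpwt (fun a ha => hall a (List.mem_cons_of_mem _ ha))⟩
      intro z hz
      rcases (PySem.List.mem_insertBy _ _ _ _).mp hz with rfl | hz'
      · rcases lt_or_eq_of_le h with h' | h'
        · exact Or.inl h'
        · exact Or.inr ⟨h', hall y List.mem_cons_self⟩
      · exact hy z hz'

theorem pv_foldl_insertBy_stable (key : Int → Int) :
    ∀ (xs acc : List Int),
      acc.Pairwise (fun a b => key a < key b ∨ (key a = key b ∧ a < b)) →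
      xs.Pairwise (· < ·) →
      (∀ a ∈ acc, ∀ x ∈ xs, a < x) →
      (xs.foldl (fun acc x => PySem.List.insertBy (fun a b => decide (key a < key b)) x acc)
        acc).Pairwise (fun a b => key a < key b ∨ (key a = key b ∧ a < b)) := by
  intro xs
  induction xs with
  | nil => intro acc hacc _ _; exact hacc
  | cons x xs ih =>
    intro acc hacc hpw hall
    simp only [List.foldl_cons]
    refine ih _ (pv_insertBy_stable key x acc hacc (fun a ha => hall a ha x List.mem_cons_self))
      hpw.of_cons ?_
    intro a ha z hz
    rcases (PySem.List.mem_insertBy _ _ _ _).mp ha with rfl | ha'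
    · exact (List.pairwise_cons.mp hpw).1 z hz
    · exact hall a ha' z (List.mem_cons_of_mem _ hz)

theorem pv_sorted_stable (key : Int → Int) (xs : List Int) (h : xs.Pairwise (· < ·)) :
    (PySem.List.sorted xs key).Pairwise
      (fun a b => key a < key b ∨ (key a = key b ∧ a < b)) := by
  rw [PySem.List.sorted_eq_foldl_insertBy]
  exact pv_foldl_insertBy_stable key xs [] List.Pairwise.nil h (by simp)

-- main agreement: when some in-range index is unused, both programs return the
-- (value, index)-lexicographically least unused in-range index
theorem pv_main (l used : List Int) (h0 : l.length ≠ 0) (h1 : l.length ≠ used.length)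
    (hex : ∃ i ∈ PySem.List.pyRange 0 (l.length : Int) 1, i ∉ used) :
    find_index_of_min l used = find_index_of_min_alt l used := by
  obtain ⟨i0, hi0R, hi0u⟩ := hex
  have hguard : ¬(l.length = 0 ∨ l.length = used.length) := by tauto
  -- the first-unused index m0
  have hm0 := pv_firstUnused_spec used (used.length + 1) (-1)
    (by obtain ⟨k, hk1, hk2, hk3⟩ := pv_exists_unused used
        exact ⟨k, hk1, by push_cast at hk2 ⊢; omega, hk3⟩)
  have hmin : ∀ j : Int, 0 ≤ j → j < pyA_firstUnused used (used.length + 1) (-1) → j ∈ used :=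
    fun j hj1 hj2 => hm0.2.2 j (by omega) hj2
  have hi0b := PySem.List.mem_pyRange_one.mp hi0R
  have hm0lt : pyA_firstUnused used (used.length + 1) (-1) < (l.length : Int) := by
    by_contra hc
    exact hi0u (hmin i0 (by omega) (by omega))
  have hm0R : pyA_firstUnused used (used.length + 1) (-1) ∈
      PySem.List.pyRange 0 (l.length : Int) 1 :=
    PySem.List.mem_pyRange_one.mpr ⟨by omega, hm0lt⟩
  -- A's result: instantiate the fold characterisation
  have hA := pv_fold_min used (fun i => PySem.List.pyGetD l i 0)
    (PySem.List.pyRange 0 (l.length : Int) 1) (pyA_firstUnused used (used.length + 1) (-1))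
    hm0.1
    (fun i hiR hiu => by
      have hib := PySem.List.mem_pyRange_one.mp hiR
      by_contra hc
      exact hiu (hmin i (by omega) (by omega)))
    (PySem.List.pairwise_lt_pyRange_one _ _)
  have hAR : ((PySem.List.pyRange 0 (l.length : Int) 1).foldl
      (fun m it => if it ∉ used then
        (if (fun i => PySem.List.pyGetD l i 0) m > (fun i => PySem.List.pyGetD l i 0) it
         then it else m) else m)
      (pyA_firstUnused used (used.length + 1) (-1))) ∈
      PySem.List.pyRange 0 (l.length : Int) 1 := by
    rcases hA.2.1 with h' | h'
    · rw [h']; exact hm0R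
    · exact h'
  -- B's result: the first unused index of the stable sorted order
  have hstab := pv_sorted_stable (fun i => PySem.List.pyGetD l i 0)
    (PySem.List.pyRange 0 (l.length : Int) 1) (PySem.List.pairwise_lt_pyRange_one _ _)
  obtain ⟨j, hj⟩ : ∃ j, (PySem.List.sorted (PySem.List.pyRange 0 (l.length : Int) 1)
      (fun i => PySem.List.pyGetD l i 0)).find? (fun i => decide (i ∉ used)) = some j := by
    cases hfind : (PySem.List.sorted (PySem.List.pyRange 0 (l.length : Int) 1)
        (fun i => PySem.List.pyGetD l i 0)).find? (fun i => decide (i ∉ used)) with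
    | some j => exact ⟨j, rfl⟩
    | none =>
      have := List.find?_eq_none.mp hfind i0 ((PySem.List.mem_sorted _ _ _ _).mpr hi0R)
      simp only [decide_eq_true_eq] at this
      exact absurd hi0u this
  obtain ⟨hpj, as, bs, hsplit, has⟩ := List.find?_eq_some_iff_append.mp hj
  have hju : j ∉ used := by simpa using hpj
  have hjR : j ∈ PySem.List.pyRange 0 (l.length : Int) 1 :=
    (PySem.List.mem_sorted _ _ _ _).mp
      (hsplit ▸ (List.mem_append.mpr (Or.inr List.mem_cons_self)))
  have hjlex : ∀ i ∈ PySem.List.pyRange 0 (l.length : Int) 1, i ∉ used → i ≠ j →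
      PySem.List.pyGetD l j 0 < PySem.List.pyGetD l i 0 ∨
        (PySem.List.pyGetD l j 0 = PySem.List.pyGetD l i 0 ∧ j < i) := by
    intro i hiR hiu hij
    have hio : i ∈ PySem.List.sorted (PySem.List.pyRange 0 (l.length : Int) 1)
        (fun i => PySem.List.pyGetD l i 0) := (PySem.List.mem_sorted _ _ _ _).mpr hiR
    rw [hsplit] at hio hstab
    rcases List.mem_append.mp hio with hia | hib
    · have := has i hia
      simp only [Bool.not_eq_eq_eq_not, Bool.not_true, decide_eq_false_iff_not,
        not_not] at this
      exact absurd this hiu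
    · rcases List.mem_cons.mp hib with rfl | hib'
      · exact absurd rfl hij
      · exact (List.pairwise_cons.mp (List.pairwise_append.mp hstab).2.1).1 i hib'
  -- the two results coincide
  have hAeqj : ((PySem.List.pyRange 0 (l.length : Int) 1).foldl
      (fun m it => if it ∉ used then
        (if (fun i => PySem.List.pyGetD l i 0) m > (fun i => PySem.List.pyGetD l i 0) it
         then it else m) else m)
      (pyA_firstUnused used (used.length + 1) (-1))) = j := by
    by_cases hd : ((PySem.List.pyRange 0 (l.length : Int) 1).foldl
        (fun m it => if it ∉ used then
          (if (fun i => PySem.List.pyGetD l i 0) m > (fun i => PySem.List.pyGetD l i 0) it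
           then it else m) else m)
        (pyA_firstUnused used (used.length + 1) (-1))) = j
    · exact hd
    · have h2 := hjlex _ hAR hA.1 hd
      have h3 := hA.2.2.2 j hjR hju
      simp only at h2 h3
      rcases h2 with h2 | ⟨h2a, h2b⟩ <;> rcases h3 with h3 | ⟨h3a, h3b⟩ <;> omega
  unfold find_index_of_min find_index_of_min_alt
  rw [if_neg hguard, if_neg hguard, hj]
  exact hAeqj

-- when the guard fires, both return -1
theorem pv_guard_case (l used : List Int) (h : l.length = 0 ∨ l.length = used.length) :
    find_index_of_min l used = find_index_of_min_alt l used := by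
  unfold find_index_of_min find_index_of_min_alt
  rw [if_pos h, if_pos h]

-- ===== VERDICT (by name: the statement is the Claim_ definition above) =====
theorem find_index_of_min_spec : Claim_unchanged_find_index_of_min := by
  intro l used _ hnd
  by_cases hg : l.length = 0 ∨ l.length = used.length
  · exact pv_guard_case l used hg
  · push_neg at hg
    have hex : ∃ i ∈ PySem.List.pyRange 0 (l.length : Int) 1, i ∉ used := by
      by_contra hc
      push_neg at hc
      exact hnd ⟨fun h => hg.1 (by simp [h]), hg.2, hc⟩
    exact pv_main l used hg.1 hg.2 hex

theorem find_index_of_min_changed : Claim_changed_find_index_of_min := by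
  unfold Claim_changed_find_index_of_min; decide

theorem find_index_of_min_tight : Claim_exact_find_index_of_min := by
  intro l used _ hd
  obtain ⟨hne, hlen, hall⟩ := hd
  have h0 : l.length ≠ 0 := fun h => hne (List.length_eq_zero_iff.mp h)
  have hguard : ¬(l.length = 0 ∨ l.length = used.length) := by tauto
  have hm0 := pv_firstUnused_spec used (used.length + 1) (-1)
    (by obtain ⟨k, hk1, hk2, hk3⟩ := pv_exists_unused used
        exact ⟨k, hk1, by push_cast at hk2 ⊢; omega, hk3⟩)
  have hBnone : (PySem.List.sorted (PySem.List.pyRange 0 (l.length : Int) 1)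
      (fun i => PySem.List.pyGetD l i 0)).find? (fun i => decide (i ∉ used)) = none := by
    apply List.find?_eq_none.mpr
    intro x hx
    have hxR : x ∈ PySem.List.pyRange 0 (l.length : Int) 1 := (PySem.List.mem_sorted _ _ _ _).mp hx
    simp only [decide_eq_true_eq, not_not]
    exact hall x hxR
  have hB : find_index_of_min_alt l used = -1 := by
    unfold find_index_of_min_alt
    rw [if_neg hguard, hBnone]
  have hAv : find_index_of_min l used = pyA_firstUnused used (used.length + 1) (-1) := by
    unfold find_index_of_min
    rw [if_neg hguard]
    exact pv_fold_noop l used _ _ hall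
  rw [hAv, hB]
  have := hm0.2.1
  omega
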